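-- pv_equiv track=rewrite | github.com/andresscode/coursera-cs-math-specialization | math-thinking-cs/week-06/puzzle-15/main.py | get_target_goal_pos
-- ===== SOURCE A (Python) =====
-- goal_pos = [
--     [1, 2, 3, 4],
--     [5, 6, 7, 8],
--     [9, 10, 11, 12],
--     [13, 14, 15, 0]
-- ]
--
-- def get_target_goal_pos(matrix, moves_map, n=4):
--     k = 0, 0
--     for i in range(n - 1):
--         for row in range(i, n):
--             if matrix[row][i] == goal_pos[k[0]][k[1]]:
--                 moves_map[row][i] = 1
--                 if row + 1 < n:
--                     k = row + 1, i
--                 else: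
--                     k = i, i + 1
--             else:
--                 return k
--         for col in range(i + 1, n):
--             if matrix[i][col] == goal_pos[k[0]][k[1]]:
--                 moves_map[i][col] = 1
--                 if col + 1 < n:
--                     k = i, col + 1
--                 else:
--                     k = i + 1, i + 1
--             else:
--                 return k
--     return n - 1, n - 1
-- ===== SOURCE B (Python) =====
-- goal_pos = [
--     [1, 2, 3, 4],
--     [5, 6, 7, 8],
--     [9, 10, 11, 12],
--     [13, 14, 15, 0]
-- ]
--
-- def _next_cell(r, c, n):
--     # Closed-form successor of a cell in the solving walk: descend the column
--     # segment of layer c, jump to that layer's row segment, move right, then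
--     # enter the next layer at its diagonal cell.
--     if c <= r:
--         return (r + 1, c) if r + 1 < n else (c, c + 1)
--     return (r, c + 1) if c + 1 < n else (r + 1, r + 1)
--
-- def _scan(matrix, moves_map, n, r, c):
--     # Tail-recursive pointer walk: one cell per call, O(1) state, the cell is
--     # always compared with the goal value at the SAME cell.
--     if (r, c) == (n - 1, n - 1) or matrix[r][c] != goal_pos[r][c]:
--         return r, c
--     moves_map[r][c] = 1
--     nr, nc = _next_cell(r, c, n)
--     return _scan(matrix, moves_map, n, nr, nc)
--
-- def get_target_goal_pos(matrix, moves_map, n=4):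
--     if n < 2:
--         return n - 1, n - 1
--     return _scan(matrix, moves_map, n, 0, 0)
-- ===== Notes on version B (the rewrite author's own statement) =====
-- stated objective: alternative
-- what changed: B replaces A's three nested loops with stateful lookahead pointer k by a tail-recursive pointer walk: one cell per call, a closed-form O(1) successor function on (r,c), and a uniform comparison of each cell with the goal value at the same cell.
import Mathlib
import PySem

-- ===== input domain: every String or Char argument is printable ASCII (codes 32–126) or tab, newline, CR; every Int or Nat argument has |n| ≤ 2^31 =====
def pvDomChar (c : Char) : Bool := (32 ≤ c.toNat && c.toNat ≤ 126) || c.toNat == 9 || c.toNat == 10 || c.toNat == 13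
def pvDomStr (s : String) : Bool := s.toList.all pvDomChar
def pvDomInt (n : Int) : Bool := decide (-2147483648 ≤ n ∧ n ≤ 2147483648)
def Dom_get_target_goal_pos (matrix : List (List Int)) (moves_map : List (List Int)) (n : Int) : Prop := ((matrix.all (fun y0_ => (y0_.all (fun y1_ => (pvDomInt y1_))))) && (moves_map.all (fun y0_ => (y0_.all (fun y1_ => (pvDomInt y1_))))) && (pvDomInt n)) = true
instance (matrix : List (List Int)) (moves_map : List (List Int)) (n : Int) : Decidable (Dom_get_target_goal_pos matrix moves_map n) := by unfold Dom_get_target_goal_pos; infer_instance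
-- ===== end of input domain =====

-- B replaces A's nested loops and lookahead pointer k by a tail-recursive pointer walk
-- with a closed-form O(1) successor function — objective: alternative decomposition.
-- A mutates moves_map in place; B performs the same mutations, and the equivalence
-- proved here is about the return value only.

-- ===== PORT A =====
def pvGoal : List (List Int) := [[1, 2, 3, 4], [5, 6, 7, 8], [9, 10, 11, 12], [13, 14, 15, 0]]

-- double subscript m[r][c]; default value only reached on inputs excluded by Pre_ (Python raises there)
def pvAt (m : List (List Int)) (r c : Int) : Int :=
  (PySem.List.pyGet? ((PySem.List.pyGet? m r).getD []) c).getD 0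

-- 'for row in range(i, n)' of A over the materialised range, with the lookahead state k;
-- .inl = early return, .inr = final k
def pvColLoopA (matrix : List (List Int)) (i n : Int) : Int × Int → List Int → Sum (Int × Int) (Int × Int)
  | k, [] => Sum.inr k
  | k, row :: rest =>
    if pvAt matrix row i = pvAt pvGoal k.1 k.2 then
      pvColLoopA matrix i n (if row + 1 < n then (row + 1, i) else (i, i + 1)) rest
    else Sum.inl k

-- 'for col in range(i + 1, n)' of A
def pvRowLoopA (matrix : List (List Int)) (i n : Int) : Int × Int → List Int → Sum (Int × Int) (Int × Int)
  | k, [] => Sum.inr k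
  | k, col :: rest =>
    if pvAt matrix i col = pvAt pvGoal k.1 k.2 then
      pvRowLoopA matrix i n (if col + 1 < n then (i, col + 1) else (i + 1, i + 1)) rest
    else Sum.inl k

-- 'for i in range(n - 1)' of A
def pvOuterA (matrix : List (List Int)) (n : Int) : Int × Int → List Int → Int × Int
  | _, [] => (n - 1, n - 1)
  | k, i :: rest =>
    match pvColLoopA matrix i n k (PySem.List.pyRange i n 1) with
    | Sum.inl r => r
    | Sum.inr k1 =>
      match pvRowLoopA matrix i n k1 (PySem.List.pyRange (i + 1) n 1) with
      | Sum.inl r => r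
      | Sum.inr k2 => pvOuterA matrix n k2 rest

def get_target_goal_pos (matrix : List (List Int)) (moves_map : List (List Int)) (n : Int) : Int × Int :=
  pvOuterA matrix n (0, 0) (PySem.List.pyRange 0 (n - 1) 1)

-- ===== PORT B =====
-- B's '_next_cell': closed-form successor of a cell in the solving walk
def pvNext (r c n : Int) : Int × Int :=
  if c ≤ r then (if r + 1 < n then (r + 1, c) else (c, c + 1))
  else (if c + 1 < n then (r, c + 1) else (r + 1, r + 1))

-- B's '_scan': tail-recursive pointer walk, one cell per step; the fuel argument only
-- makes the recursion total in Lean (the walk from (0,0) always terminates within it)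
def pvScanB (matrix : List (List Int)) (n : Int) (fuel : Nat) (p : Int × Int) : Int × Int :=
  match fuel with
  | 0 => p
  | fuel + 1 =>
    if (p.1 = n - 1 ∧ p.2 = n - 1) ∨ pvAt matrix p.1 p.2 ≠ pvAt pvGoal p.1 p.2 then p
    else pvScanB matrix n fuel (pvNext p.1 p.2 n)

def get_target_goal_pos_alt (matrix : List (List Int)) (moves_map : List (List Int)) (n : Int) : Int × Int :=
  if n < 2 then (n - 1, n - 1)
  else pvScanB matrix n (2 * n * (n + 1)).toNat (0, 0)

-- ===== PRECONDITION & SPEC =====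
-- Cells A can possibly visit, in visiting order: for n ≤ 4 the whole border traversal;
-- for n ≥ 5 only the first five cells of column 0 matter, because reaching (4,0) with all
-- earlier cells matched makes goal_pos[4] raise IndexError regardless of the rest.
def pvCells (n : Int) : List (Int × Int) :=
  if n ≤ 1 then []
  else if n = 2 then [(0, 0), (1, 0), (0, 1)]
  else if n = 3 then [(0, 0), (1, 0), (2, 0), (0, 1), (0, 2), (1, 1), (2, 1), (1, 2)]
  else if n = 4 then
    [(0, 0), (1, 0), (2, 0), (3, 0), (0, 1), (0, 2), (0, 3),
     (1, 1), (2, 1), (3, 1), (1, 2), (1, 3), (2, 2), (3, 2), (2, 3)]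
  else [(0, 0), (1, 0), (2, 0), (3, 0), (4, 0)]

def pvGetCell (m : List (List Int)) (p : Int × Int) : Option Int :=
  (PySem.List.pyGet? m p.1).bind (fun row => PySem.List.pyGet? row p.2)

-- the cell exists in matrix and in goal_pos and the two values agree
def pvMatchedB (matrix : List (List Int)) (p : Int × Int) : Bool :=
  match pvGetCell matrix p, pvGetCell pvGoal p with
  | some a, some g => a == g
  | _, _ => false

-- visiting cell p does not raise: both reads succeed, and on a match the
-- moves_map write 'moves_map[p.1][p.2] = 1' is in range
def pvSafeB (matrix moves_map : List (List Int)) (p : Int × Int) : Bool :=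
  match pvGetCell matrix p, pvGetCell pvGoal p with
  | some a, some g =>
    if a == g then
      match PySem.List.pyGet? moves_map p.1 with
      | some row => decide (p.2 < (row.length : Int))
      | none => false
    else true
  | _, _ => false

-- scan the visit-order cell list: every reached cell must be safe; cells after the
-- first mismatch are never reached, so they are not checked
def pvCheckCells (matrix moves_map : List (List Int)) : List (Int × Int) → Bool
  | [] => true
  | p :: rest =>
    pvSafeB matrix moves_map p && (!(pvMatchedB matrix p) || pvCheckCells matrix moves_map rest)

-- Pre_ excludes exactly the inputs on which A raises IndexError: some border cell that is
-- reached (all cells before it in traversal order match the goal) has an out-of-range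
-- matrix/goal_pos read or moves_map write.  A returns on every input satisfying Pre_.
def Pre_get_target_goal_pos (matrix : List (List Int)) (moves_map : List (List Int)) (n : Int) : Prop :=
  pvCheckCells matrix moves_map (pvCells n) = true
instance (matrix : List (List Int)) (moves_map : List (List Int)) (n : Int) : Decidable (Pre_get_target_goal_pos matrix moves_map n) := by unfold Pre_get_target_goal_pos; infer_instance

def pvWitness_get_target_goal_pos : List (List Int) × List (List Int) × Int :=
  ([[5, 0], [0, 0]], [[0, 0], [0, 0]], 2)

def Spec_get_target_goal_pos (matrix : List (List Int)) (moves_map : List (List Int)) (n : Int) (out : Int × Int) : Prop := out = get_target_goal_pos_alt matrix moves_map n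
instance (matrix : List (List Int)) (moves_map : List (List Int)) (n : Int) (out : Int × Int) : Decidable (Spec_get_target_goal_pos matrix moves_map n out) := by unfold Spec_get_target_goal_pos; infer_instance

-- ===== CLAIM (what is proved, stated in full; the proofs are below) =====
def Claim_equal_get_target_goal_pos : Prop := ∀ (matrix : List (List Int)) (moves_map : List (List Int)) (n : Int), Dom_get_target_goal_pos matrix moves_map n → Pre_get_target_goal_pos matrix moves_map n → Spec_get_target_goal_pos matrix moves_map n (get_target_goal_pos matrix moves_map n)

-- ===== LEMMAS AND PROOFS =====

-- Proof-side layered description of the traversal: A's loops and B's walk both reduce to it.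
def pvColScanB (matrix : List (List Int)) (n i : Int) (r : Int) : Option (Int × Int) :=
  if _h : r < n then
    if pvAt matrix r i = pvAt pvGoal r i then pvColScanB matrix n i (r + 1) else some (r, i)
  else none
termination_by (n - r).toNat
decreasing_by omega

def pvRowScanB (matrix : List (List Int)) (n i : Int) (c : Int) : Option (Int × Int) :=
  if _h : c < n then
    if pvAt matrix i c = pvAt pvGoal i c then pvRowScanB matrix n i (c + 1) else some (i, c)
  else none
termination_by (n - c).toNat
decreasing_by omega

def pvLayersB (matrix : List (List Int)) (n : Int) (i : Int) : Int × Int :=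
  if _h : i < n - 1 then
    match pvColScanB matrix n i i with
    | some v => v
    | none =>
      match pvRowScanB matrix n i (i + 1) with
      | some v => v
      | none => pvLayersB matrix n (i + 1)
  else (n - 1, n - 1)
termination_by (n - 1 - i).toNat
decreasing_by omega

-- what the layered traversal computes from the middle of a layer
def pvRowResume (matrix : List (List Int)) (n i c : Int) : Int × Int :=
  match pvRowScanB matrix n i c with
  | some v => v
  | none => pvLayersB matrix n (i + 1)

def pvColResume (matrix : List (List Int)) (n i r : Int) : Int × Int :=
  match pvColScanB matrix n i r with
  | some v => v
  | none => pvRowResume matrix n i (i + 1)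

-- A's lookahead pointer k always equals the cell currently being visited, so A's column
-- loop is the layered column scan (final k on exhaustion: (i, i+1)) …
theorem pvColLoopA_eq (matrix : List (List Int)) (i n : Int) :
    ∀ (t : Nat) (r0 : Int), (n - r0).toNat = t → r0 < n →
    pvColLoopA matrix i n (r0, i) (PySem.List.pyRange r0 n 1) =
      (match pvColScanB matrix n i r0 with
       | some v => Sum.inl v
       | none => Sum.inr (i, i + 1)) := by
  intro t
  induction t with
  | zero =>
    intro r0 ht hlt
    omega
  | succ t ih =>
    intro r0 ht hlt
    rw [PySem.List.pyRange_one_cons hlt, pvColLoopA, pvColScanB]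
    simp only [hlt, dif_pos]
    by_cases hm : pvAt matrix r0 i = pvAt pvGoal r0 i
    · simp only [hm, if_pos]
      by_cases hr1 : r0 + 1 < n
      · simp only [hr1, if_pos]
        exact ih (r0 + 1) (by omega) hr1
      · simp only [hr1, if_neg, not_false_iff]
        rw [PySem.List.pyRange_one_eq_nil (by omega), pvColLoopA, pvColScanB]
        simp [hr1]
    · simp [hm]

-- … and A's row loop is the layered row scan (final k on exhaustion: (i+1, i+1)).
theorem pvRowLoopA_eq (matrix : List (List Int)) (i n : Int) :
    ∀ (t : Nat) (c0 : Int), (n - c0).toNat = t → c0 < n →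
    pvRowLoopA matrix i n (i, c0) (PySem.List.pyRange c0 n 1) =
      (match pvRowScanB matrix n i c0 with
       | some v => Sum.inl v
       | none => Sum.inr (i + 1, i + 1)) := by
  intro t
  induction t with
  | zero =>
    intro c0 ht hlt
    omega
  | succ t ih =>
    intro c0 ht hlt
    rw [PySem.List.pyRange_one_cons hlt, pvRowLoopA, pvRowScanB]
    simp only [hlt, dif_pos]
    by_cases hm : pvAt matrix i c0 = pvAt pvGoal i c0
    · simp only [hm, if_pos]
      by_cases hc1 : c0 + 1 < n
      · simp only [hc1, if_pos]
        exact ih (c0 + 1) (by omega) hc1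
      · simp only [hc1, if_neg, not_false_iff]
        rw [PySem.List.pyRange_one_eq_nil (by omega), pvRowLoopA, pvRowScanB]
        simp [hc1]
    · simp [hm]

theorem pvOuterA_eq (matrix : List (List Int)) (n : Int) :
    ∀ (t : Nat) (j : Int), (n - 1 - j).toNat = t →
    pvOuterA matrix n (j, j) (PySem.List.pyRange j (n - 1) 1) = pvLayersB matrix n j := by
  intro t
  induction t with
  | zero =>
    intro j ht
    rw [PySem.List.pyRange_one_eq_nil (by omega), pvOuterA, pvLayersB]
    have : ¬ j < n - 1 := by omega
    simp [this]
  | succ t ih =>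
    intro j ht
    have hlt : j < n - 1 := by omega
    rw [PySem.List.pyRange_one_cons hlt, pvOuterA, pvLayersB]
    simp only [hlt, dif_pos]
    rw [pvColLoopA_eq matrix j n (n - j).toNat j rfl (by omega)]
    cases hcol : pvColScanB matrix n j j with
    | some v => simp
    | none =>
      simp only
      rw [pvRowLoopA_eq matrix j n (n - (j + 1)).toNat (j + 1) rfl (by omega)]
      cases hrow : pvRowScanB matrix n j (j + 1) with
      | some v => simp
      | none =>
        simp only
        exact ih (j + 1) (by omega)

theorem pvScanB_term (matrix : List (List Int)) (n : Int) (fuel : Nat) :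
    pvScanB matrix n fuel (n - 1, n - 1) = (n - 1, n - 1) := by
  cases fuel with
  | zero => rfl
  | succ f => simp [pvScanB]

-- B's pointer walk, started anywhere inside a layer with enough fuel, computes the
-- layered traversal's resume value (main invariant; fuel counted by a quadratic potential)
theorem pvScan_main (matrix : List (List Int)) (n : Int) : ∀ (fuel : Nat),
    (∀ i r : Int, 0 ≤ i → i ≤ r → r < n → i < n - 1 →
      2 * n * (n - i) + (2 * n - r + i) ≤ (fuel : Int) →
      pvScanB matrix n fuel (r, i) = pvColResume matrix n i r) ∧
    (∀ i c : Int, 0 ≤ i → i < c → c < n → i < n - 1 →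
      2 * n * (n - i) + (n - c + i) ≤ (fuel : Int) →
      pvScanB matrix n fuel (i, c) = pvRowResume matrix n i c) := by
  intro fuel
  induction fuel with
  | zero =>
    constructor
    · intro i r h0 hir hrn hin hf
      exfalso
      have hP : (0 : Int) ≤ 2 * n * (n - i) := mul_nonneg (by omega) (by omega)
      push_cast at hf
      linarith
    · intro i c h0 hic hcn hin hf
      exfalso
      have hP : (0 : Int) ≤ 2 * n * (n - i) := mul_nonneg (by omega) (by omega)
      push_cast at hf
      linarith
  | succ fuel ih =>
    obtain ⟨ihc, ihr⟩ := ih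
    constructor
    · -- column state (r, i)
      intro i r h0 hir hrn hin hf
      rw [pvScanB]
      by_cases hm : pvAt matrix r i = pvAt pvGoal r i
      · have hguard : ¬ ((r = n - 1 ∧ i = n - 1) ∨ pvAt matrix r i ≠ pvAt pvGoal r i) := by
          simp [hm]; omega
        simp only [hguard, if_neg, not_false_iff]
        by_cases hr1 : r + 1 < n
        · have hnext : pvNext r i n = (r + 1, i) := by simp [pvNext, hir, hr1]
          rw [hnext]
          rw [ihc i (r + 1) h0 (by omega) hr1 hin (by push_cast at hf ⊢; linarith)]
          have hs : pvColScanB matrix n i r = pvColScanB matrix n i (r + 1) := by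
            rw [pvColScanB]
            simp [hrn, hm]
          unfold pvColResume
          rw [hs]
        · have hnext : pvNext r i n = (i, i + 1) := by simp [pvNext, hir, hr1]
          rw [hnext]
          have hr : r = n - 1 := by omega
          rw [ihr i (i + 1) h0 (by omega) (by omega) hin (by push_cast at hf ⊢; linarith)]
          have hs : pvColScanB matrix n i r = none := by
            rw [pvColScanB]
            simp only [hrn, dif_pos, hm, if_pos]
            rw [pvColScanB]
            simp [hr1]
          unfold pvColResume
          rw [hs]
      · have hguard : ((r = n - 1 ∧ i = n - 1) ∨ pvAt matrix r i ≠ pvAt pvGoal r i) := Or.inr hm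
        simp only [hguard, if_pos]
        have hs : pvColScanB matrix n i r = some (r, i) := by
          rw [pvColScanB]
          simp [hrn, hm]
        unfold pvColResume
        rw [hs]
    · -- row state (i, c)
      intro i c h0 hic hcn hin hf
      rw [pvScanB]
      by_cases hm : pvAt matrix i c = pvAt pvGoal i c
      · have hguard : ¬ ((i = n - 1 ∧ c = n - 1) ∨ pvAt matrix i c ≠ pvAt pvGoal i c) := by
          simp [hm]; omega
        simp only [hguard, if_neg, not_false_iff]
        by_cases hc1 : c + 1 < n
        · have hnext : pvNext i c n = (i, c + 1) := by
            have : ¬ c ≤ i := by omega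
            simp [pvNext, this, hc1]
          rw [hnext]
          rw [ihr i (c + 1) h0 (by omega) hc1 hin (by push_cast at hf ⊢; linarith)]
          have hs : pvRowScanB matrix n i c = pvRowScanB matrix n i (c + 1) := by
            rw [pvRowScanB]
            simp [hcn, hm]
          unfold pvRowResume
          rw [hs]
        · have hnext : pvNext i c n = (i + 1, i + 1) := by
            have : ¬ c ≤ i := by omega
            simp [pvNext, this, hc1]
          rw [hnext]
          have hc : c = n - 1 := by omega
          have hrow : pvRowScanB matrix n i c = none := by
            rw [pvRowScanB]
            simp only [hcn, dif_pos, hm, if_pos]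
            rw [pvRowScanB]
            simp [hc1]
          by_cases hi1 : i + 1 < n - 1
          · rw [ihc (i + 1) (i + 1) (by omega) le_rfl (by omega) hi1 (by
              have hPQ : 2 * n * (n - i) = 2 * n * (n - (i + 1)) + 2 * n := by ring
              push_cast at hf ⊢
              linarith)]
            unfold pvRowResume
            rw [hrow]
            rw [pvLayersB]
            simp only [hi1, dif_pos]
            unfold pvColResume pvRowResume
            rfl
          · have hterm : (i + 1, i + 1) = ((n - 1 : Int), (n - 1 : Int)) := by
              have : i + 1 = n - 1 := by omega
              simp [this]
            rw [hterm, pvScanB_term]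
            unfold pvRowResume
            rw [hrow]
            rw [pvLayersB]
            simp [hi1]
      · have hguard : ((i = n - 1 ∧ c = n - 1) ∨ pvAt matrix i c ≠ pvAt pvGoal i c) := Or.inr hm
        simp only [hguard, if_pos]
        have hs : pvRowScanB matrix n i c = some (i, c) := by
          rw [pvRowScanB]
          simp [hcn, hm]
        unfold pvRowResume
        rw [hs]

-- ===== VERDICT (by name: the statement is the Claim_ definition above) =====
theorem get_target_goal_pos_spec : Claim_equal_get_target_goal_pos := by
  intro matrix moves_map n _hdom _hpre
  unfold Spec_get_target_goal_pos get_target_goal_pos get_target_goal_pos_alt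
  by_cases hn : n < 2
  · rw [PySem.List.pyRange_one_eq_nil (by omega), pvOuterA]
    simp [hn]
  · simp only [hn, if_neg, not_false_iff]
    rw [pvOuterA_eq matrix n (n - 1 - 0).toNat 0 rfl]
    have hfuel : 2 * n * (n - 0) + (2 * n - 0 + 0) ≤ (((2 * n * (n + 1)).toNat : Nat) : Int) := by
      rw [Int.toNat_of_nonneg (mul_nonneg (by omega) (by omega))]
      have : 2 * n * (n + 1) = 2 * n * (n - 0) + (2 * n - 0 + 0) := by ring
      linarith
    rw [(pvScan_main matrix n (2 * n * (n + 1)).toNat).1 0 0 le_rfl le_rfl (by omega) (by omega) hfuel]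
    unfold pvColResume
    rw [pvLayersB]
    have h01 : (0 : Int) < n - 1 := by omega
    simp only [h01, dif_pos]
    cases hcol : pvColScanB matrix n 0 0 with
    | some v => rfl
    | none =>
      unfold pvRowResume
      rfl
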